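-- pv_equiv track=rewrite | github.com/qyuan2/TAGAPT_generated_samples | Find_hub_process_test.py | split_flow
-- ===== SOURCE A (Python) =====
-- def split_flow(hub_process,all_paths_reasonable):
--     divided_paths_reasonable = []
--     for flow in all_paths_reasonable:
--         current_subflow = []
--         for item in flow:
--             if (item in hub_process) and (item != flow[0]) and (item != flow[-1]):
--                 current_subflow.append(item)
--                 if current_subflow not in divided_paths_reasonable:
--                     divided_paths_reasonable.append(current_subflow)
--                 current_subflow = [item]
--             else:
--                 current_subflow.append(item)
--         if (len(current_subflow) != 0) and (current_subflow not in divided_paths_reasonable):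
--             divided_paths_reasonable.append(current_subflow)
--     return divided_paths_reasonable
-- ===== SOURCE B (Python) =====
-- def split_flow(hub_process, all_paths_reasonable):
--     # Phase 1: slice each flow into overlapping segments at interior hub values.
--     hubs = set(hub_process)
--     segments = []
--     for flow in all_paths_reasonable:
--         if not flow:
--             continue
--         first, last = flow[0], flow[-1]
--         cuts = [i for i, x in enumerate(flow)
--                 if x in hubs and x != first and x != last]
--         start = 0
--         for c in cuts:
--             segments.append(flow[start:c + 1])
--             start = c
--         segments.append(flow[start:])
--     # Phase 2: dedup keeping first occurrences.
--     seen = set()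
--     result = []
--     for seg in segments:
--         key = tuple(seg)
--         if key not in seen:
--             seen.add(key)
--             result.append(seg)
--     return result
-- ===== Notes on version B (the rewrite author's own statement) =====
-- stated objective: faster
-- what changed: A's single pass that grows a current subflow and dedup-appends it inline via list membership is replaced by a two-phase design: per flow compute cut indices and build segments by slicing, then one separate first-occurrence dedup pass over all segments using a hashed seen-set of tuples.
import Mathlib
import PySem

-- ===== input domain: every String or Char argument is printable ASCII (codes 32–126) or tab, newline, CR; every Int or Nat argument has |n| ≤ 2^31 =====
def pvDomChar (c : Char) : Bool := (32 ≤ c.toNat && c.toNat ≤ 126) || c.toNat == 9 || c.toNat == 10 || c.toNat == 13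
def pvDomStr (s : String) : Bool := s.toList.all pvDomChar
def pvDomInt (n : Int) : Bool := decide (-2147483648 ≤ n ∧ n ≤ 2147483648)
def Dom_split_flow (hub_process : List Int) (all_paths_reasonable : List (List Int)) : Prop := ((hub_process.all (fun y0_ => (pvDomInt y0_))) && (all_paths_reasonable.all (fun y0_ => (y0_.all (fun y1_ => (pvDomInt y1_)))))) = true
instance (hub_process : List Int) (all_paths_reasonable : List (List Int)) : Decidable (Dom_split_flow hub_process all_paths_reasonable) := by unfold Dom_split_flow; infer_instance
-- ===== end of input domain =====

-- B replaces A's single incremental append-with-inline-dedup pass by an index/slice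
-- segmentation phase followed by a separate hashed first-occurrence dedup pass (measured faster).

-- ===== PORT A =====
-- flow[0] / flow[-1] are only evaluated while iterating a nonempty flow, where pyGetD with default 0 is exact
def split_flow (hub_process : List Int) (all_paths_reasonable : List (List Int)) : List (List Int) :=
  all_paths_reasonable.foldl (fun divided flow =>
    let st := flow.foldl (fun (q : List (List Int) × List Int) item =>
      if item ∈ hub_process ∧ item ≠ PySem.List.pyGetD flow 0 0 ∧ item ≠ PySem.List.pyGetD flow (-1) 0 then
        let cur := q.2 ++ [item]
        ((if cur ∈ q.1 then q.1 else q.1 ++ [cur]), [item])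
      else
        (q.1, q.2 ++ [item])) (divided, [])
    if st.2 ≠ [] ∧ st.2 ∉ st.1 then st.1 ++ [st.2] else st.1) []

-- ===== PORT B =====
-- phase-1 body of Source B for one flow: cut indices (enumerate + filter), then slices
def pvSegments (hub_process : List Int) (flow : List Int) : List (List Int) :=
  if flow = [] then []
  else
    let first := PySem.List.pyGetD flow 0 0
    let last := PySem.List.pyGetD flow (-1) 0
    let cuts := (PySem.List.enumerate flow 0).filterMap (fun q =>
      if q.2 ∈ hub_process ∧ q.2 ≠ first ∧ q.2 ≠ last then some q.1 else none)
    let st := cuts.foldl (fun (q : List (List Int) × Int) c =>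
      (q.1 ++ [PySem.List.slice flow (some q.2) (some (c + 1))], c)) ([], 0)
    st.1 ++ [PySem.List.slice flow (some st.2) none]

def split_flow_alt (hub_process : List Int) (all_paths_reasonable : List (List Int)) : List (List Int) :=
  let segments := all_paths_reasonable.foldl (fun acc flow => acc ++ pvSegments hub_process flow) []
  segments.foldl (fun res seg => if seg ∈ res then res else res ++ [seg]) []

-- ===== PRECONDITION & SPEC =====
def Spec_split_flow (hub_process : List Int) (all_paths_reasonable : List (List Int)) (out : List (List Int)) : Prop := out = split_flow_alt hub_process all_paths_reasonable
instance (hub_process : List Int) (all_paths_reasonable : List (List Int)) (out : List (List Int)) : Decidable (Spec_split_flow hub_process all_paths_reasonable out) := by unfold Spec_split_flow; infer_instance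

-- ===== CLAIM (what is proved, stated in full; the proofs are below) =====
def Claim_equal_split_flow : Prop := ∀ (hub_process : List Int) (all_paths_reasonable : List (List Int)), Dom_split_flow hub_process all_paths_reasonable → Spec_split_flow hub_process all_paths_reasonable (split_flow hub_process all_paths_reasonable)

-- ===== LEMMAS AND PROOFS =====

-- dedup step shared by both characterisations
def pvDed (d : List (List Int)) (s : List Int) : List (List Int) :=
  if s ∈ d then d else d ++ [s]

-- recursive segmentation of one flow at interior hub elements (proof-only reference)
def pvSegsRec (p : Int → Prop) [DecidablePred p] : List Int → List Int → List (List Int)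
  | cur, [] => [cur]
  | cur, x :: xs => if p x then (cur ++ [x]) :: pvSegsRec p [x] xs else pvSegsRec p (cur ++ [x]) xs

def pvStepA (p : Int → Prop) [DecidablePred p] (q : List (List Int) × List Int) (item : Int) :
    List (List Int) × List Int :=
  if p item then ((if q.2 ++ [item] ∈ q.1 then q.1 else q.1 ++ [q.2 ++ [item]]), [item])
  else (q.1, q.2 ++ [item])

def pvPost (st : List (List Int) × List Int) : List (List Int) :=
  if st.2 ≠ [] ∧ st.2 ∉ st.1 then st.1 ++ [st.2] else st.1

-- A's inner loop + final append = fold of pvDed over the recursive segmentation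
lemma pvInnerA (p : Int → Prop) [DecidablePred p] :
    ∀ (xs cur : List Int) (div : List (List Int)), cur ≠ [] ∨ xs ≠ [] →
    pvPost (xs.foldl (pvStepA p) (div, cur)) = (pvSegsRec p cur xs).foldl pvDed div := by
  intro xs
  induction xs with
  | nil =>
    intro cur div h
    rcases h with h | h
    · simp [pvPost, pvSegsRec, pvDed, h]
    · simp at h
  | cons x xs ih =>
    intro cur div h
    by_cases hp : p x
    · simp only [List.foldl_cons, pvStepA, if_pos hp]
      rw [ih [x] _ (Or.inl (by simp))]
      simp [pvSegsRec, hp, pvDed]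
    · simp only [List.foldl_cons, pvStepA, if_neg hp]
      rw [ih (cur ++ [x]) div (Or.inl (by simp))]
      simp [pvSegsRec, hp]

def pvStepB (flow : List Int) (q : List (List Int) × Int) (c : Int) : List (List Int) × Int :=
  (q.1 ++ [PySem.List.slice flow (some q.2) (some (c + 1))], c)

def pvPostB (flow : List Int) (st : List (List Int) × Int) : List (List Int) :=
  st.1 ++ [PySem.List.slice flow (some st.2) none]

-- B's slice fold over the cut indices of a suffix = the recursive segmentation
lemma pvSlices (p : Int → Prop) [DecidablePred p] (flow : List Int) :
    ∀ (xs : List Int) (k s : Nat) (acc : List (List Int)), s ≤ k → flow.drop k = xs →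
    pvPostB flow
      (((PySem.List.enumerate xs (k : Int)).filterMap
          (fun q => if p q.2 then some q.1 else none)).foldl (pvStepB flow) (acc, (s : Int)))
      = acc ++ pvSegsRec p ((flow.drop s).take (k - s)) xs := by
  intro xs
  induction xs with
  | nil =>
    intro k s acc hsk hd
    have hlen : flow.length ≤ k := by
      have := congrArg List.length hd; simp at this; omega
    have : (flow.drop s).take (k - s) = flow.drop s := by
      apply List.take_of_length_le; simp; omega
    simp [pvPostB, pvSegsRec, PySem.List.enumerate_nil, PySem.List.slice_from_natCast, this]
  | cons x xs ih =>
    intro k s acc hsk hd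
    have hkl : k < flow.length := by
      by_contra hc
      rw [List.drop_eq_nil_of_le (by omega)] at hd
      exact List.cons_ne_nil _ _ hd.symm
    have hd1 : flow.drop (k + 1) = xs := by
      rw [← List.tail_drop, hd]; rfl
    have hx : (flow.drop s).take (k - s) ++ [x] = (flow.drop s).take (k + 1 - s) := by
      have h1 : (flow.drop s).drop (k - s) = x :: xs := by
        rw [List.drop_drop, Nat.add_sub_cancel' hsk, hd]
      have h2 : (flow.drop s)[k - s]? = some x := by
        rw [← List.head?_drop, h1]; rfl
      have h3 : k + 1 - s = (k - s) + 1 := by omega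
      rw [h3, List.take_add_one, h2]; rfl
    rw [PySem.List.enumerate_cons]
    by_cases hp : p x
    · simp only [List.filterMap_cons, if_pos hp, List.foldl_cons]
      have hcast : (k : Int) + 1 = ((k + 1 : Nat) : Int) := by push_cast; ring
      have hsl : PySem.List.slice flow (some ((s : Nat) : Int)) (some ((k : Int) + 1))
          = (flow.drop s).take (k + 1 - s) := by
        rw [hcast, PySem.List.slice_natCast]
      have hone : (flow.drop k).take (k + 1 - k) = [x] := by
        rw [hd]; have : k + 1 - k = 1 := by omega
        rw [this]; rfl
      have := ih (k + 1) k (acc ++ [(flow.drop s).take (k + 1 - s)]) (by omega) hd1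
      rw [hone] at this
      rw [hcast]
      simp only [pvStepB, hsl]
      rw [this]
      simp [pvSegsRec, hp, hx]
    · simp only [List.filterMap_cons, if_neg hp]
      have hcast : (k : Int) + 1 = ((k + 1 : Nat) : Int) := by push_cast; ring
      have := ih (k + 1) s acc (by omega) hd1
      rw [hcast, this]
      simp [pvSegsRec, hp, hx]

-- pvSegments of a nonempty flow is the recursive segmentation
lemma pvSegments_eq (hub_process flow : List Int) (h : flow ≠ []) :
    pvSegments hub_process flow
      = pvSegsRec (fun x => x ∈ hub_process ∧ x ≠ PySem.List.pyGetD flow 0 0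
          ∧ x ≠ PySem.List.pyGetD flow (-1) 0) [] flow := by
  have := pvSlices (fun x => x ∈ hub_process ∧ x ≠ PySem.List.pyGetD flow 0 0
      ∧ x ≠ PySem.List.pyGetD flow (-1) 0) flow flow 0 0 [] (le_refl 0) (by simp)
  simp only [Nat.cast_zero, List.drop_zero, List.take_zero, Nat.sub_zero, List.nil_append] at this
  rw [pvSegments, if_neg h]
  exact this

-- A's whole fold = pvDed-fold over the concatenated segments
lemma pvOuter (hub_process : List Int) :
    ∀ (flows : List (List Int)) (acc : List (List Int)),
    flows.foldl (fun divided flow =>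
        pvPost (flow.foldl (pvStepA (fun x => x ∈ hub_process ∧ x ≠ PySem.List.pyGetD flow 0 0
            ∧ x ≠ PySem.List.pyGetD flow (-1) 0)) (divided, []))) acc
      = (flows.flatMap (pvSegments hub_process)).foldl pvDed acc := by
  intro flows
  induction flows with
  | nil => intro acc; simp
  | cons flow flows ih =>
    intro acc
    rw [List.foldl_cons, List.flatMap_cons, List.foldl_append, ih]
    congr 1
    by_cases h : flow = []
    · subst h; simp [pvPost, pvSegments]
    · rw [pvInnerA _ flow [] acc (Or.inr h), pvSegments_eq hub_process flow h]

-- ===== VERDICT (by name: the statement is the Claim_ definition above) =====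
theorem split_flow_spec : Claim_equal_split_flow := by
  intro hub_process flows _
  unfold Spec_split_flow split_flow split_flow_alt
  rw [show (fun (acc : List (List Int)) (flow : List Int) => acc ++ pvSegments hub_process flow)
      = (fun acc flow => acc ++ pvSegments hub_process flow) from rfl]
  rw [PySem.List.foldl_append_eq_flatMap]
  show (flows.foldl (fun divided flow =>
      pvPost (flow.foldl (pvStepA (fun x => x ∈ hub_process ∧ x ≠ PySem.List.pyGetD flow 0 0
          ∧ x ≠ PySem.List.pyGetD flow (-1) 0)) (divided, []))) [])
    = ([] ++ flows.flatMap (pvSegments hub_process)).foldl pvDed []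
  rw [List.nil_append, pvOuter]
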